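-- pv_equiv track=rewrite | github.com/minjeekim00/handhygiene | dataloader/handhygiene_triplet.py | fix_field_of_view
-- ===== SOURCE A (Python) =====
-- def fix_field_of_view(bboxes):
--
--     fov = [1280, 720, 0, 0]
--
--     for bbox in bboxes:
--         x1, y1, w, h = bbox
--         x2 = x1 + w
--         y2 = y1 + h
--
--         if x1 < fov[0]:
--             fov[0] = x1
--         if y1 < fov[1]:
--             fov[1] = y1
--         if x2 > fov[2]:
--             fov[2] = x2
--         if y2 > fov[3]:
--             fov[3] = y2
--
--     x1, y1, x2, y2 = fov
--     w = x2 - x1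
--     h = y2 - y1
--     fov = [x1, y1, w, h]
--     return [fov for i in range(len(bboxes))]
-- ===== SOURCE B (Python) =====
-- def fix_field_of_view(bboxes):
--     # Divide-and-conquer: merge corner boxes pairwise (box union), then
--     # fold in the seed box and convert back to [x, y, w, h].
--     def union(p, q):
--         return (min(p[0], q[0]), min(p[1], q[1]), max(p[2], q[2]), max(p[3], q[3]))
--
--     def dc(boxes):
--         if len(boxes) == 1:
--             return boxes[0]
--         m = len(boxes) // 2
--         return union(dc(boxes[:m]), dc(boxes[m:]))
--
--     corners = [(x, y, x + w, y + h) for x, y, w, h in bboxes]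
--     if corners:
--         x1, y1, x2, y2 = union((1280, 720, 0, 0), dc(corners))
--     else:
--         x1, y1, x2, y2 = (1280, 720, 0, 0)
--     fov = [x1, y1, x2 - x1, y2 - y1]
--     return [fov] * len(bboxes)
-- ===== Notes on version B (the rewrite author's own statement) =====
-- stated objective: alternative
-- what changed: Replaces A's fused mutating linear scan with a divide-and-conquer recursion that converts each bbox to a corner box once and merges halves with an associative box-union operation, then folds in the seed box and replicates the result.
import Mathlib
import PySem

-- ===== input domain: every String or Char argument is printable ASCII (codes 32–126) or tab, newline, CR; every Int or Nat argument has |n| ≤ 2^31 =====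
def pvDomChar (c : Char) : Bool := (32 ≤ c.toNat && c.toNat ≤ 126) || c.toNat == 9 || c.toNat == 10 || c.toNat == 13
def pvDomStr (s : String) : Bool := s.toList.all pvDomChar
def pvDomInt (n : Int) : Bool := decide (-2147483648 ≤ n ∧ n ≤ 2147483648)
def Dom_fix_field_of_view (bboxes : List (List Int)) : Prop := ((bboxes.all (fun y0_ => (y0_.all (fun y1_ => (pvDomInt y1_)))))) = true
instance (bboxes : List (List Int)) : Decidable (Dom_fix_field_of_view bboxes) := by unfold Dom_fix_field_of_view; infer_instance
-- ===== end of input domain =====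

-- B replaces A's single fused mutating scan by a divide-and-conquer recursion
-- merging corner boxes with an associative box union (objective: alternative).

-- ===== PORT A =====
-- one iteration of A's loop: unpack the bbox, conditionally update the four fov cells
def fovStep (fov : Int × Int × Int × Int) (bbox : List Int) : Int × Int × Int × Int :=
  match bbox with
  | [x1, y1, w, h] =>
    let x2 := x1 + w
    let y2 := y1 + h
    let f0 := if x1 < fov.1 then x1 else fov.1
    let f1 := if y1 < fov.2.1 then y1 else fov.2.1
    let f2 := if x2 > fov.2.2.1 then x2 else fov.2.2.1
    let f3 := if y2 > fov.2.2.2 then y2 else fov.2.2.2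
    (f0, f1, f2, f3)
  | _ => fov   -- Python raises ValueError here; excluded by Pre_

def fix_field_of_view (bboxes : List (List Int)) : List (List Int) :=
  let fov := bboxes.foldl fovStep (1280, 720, 0, 0)
  let w := fov.2.2.1 - fov.1
  let h := fov.2.2.2 - fov.2.1
  (List.range bboxes.length).map (fun _ => [fov.1, fov.2.1, w, h])

-- ===== PORT B =====
-- union of two corner boxes (x1, y1, x2, y2)
def bUnion (p q : Int × Int × Int × Int) : Int × Int × Int × Int :=
  (min p.1 q.1, min p.2.1 q.2.1, max p.2.2.1 q.2.2.1, max p.2.2.2 q.2.2.2)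

-- B's dc helper: divide-and-conquer union of a list of corner boxes
-- (none only for the empty list, which B never passes to it)
def dcU (bs : List (Int × Int × Int × Int)) : Option (Int × Int × Int × Int) :=
  match bs with
  | [] => none
  | [x] => some x
  | a :: b :: rest =>
    let m := (a :: b :: rest).length / 2
    match dcU ((a :: b :: rest).take m), dcU ((a :: b :: rest).drop m) with
    | some p, some q => some (bUnion p q)
    | _, _ => none
termination_by bs.length
decreasing_by
  · simp; omega
  · simp; omega

-- corner box of a bbox [x, y, w, h]; Python raises on other shapes (excluded by Pre_)
def toCorner (b : List Int) : Int × Int × Int × Int :=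
  match b with
  | [x, y, w, h] => (x, y, x + w, y + h)
  | _ => (0, 0, 0, 0)

def fix_field_of_view_alt (bboxes : List (List Int)) : List (List Int) :=
  let corners := bboxes.map toCorner
  let fov :=
    match dcU corners with
    | some r => bUnion (1280, 720, 0, 0) r
    | none => (1280, 720, 0, 0)        -- corners empty
  List.replicate bboxes.length [fov.1, fov.2.1, fov.2.2.1 - fov.1, fov.2.2.2 - fov.2.1]

-- ===== PRECONDITION & SPEC =====
-- Pre_ excludes bboxes that are not 4-element lists: Python A raises ValueError
-- on unpacking there (and B raises too).
def Pre_fix_field_of_view (bboxes : List (List Int)) : Prop :=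
  ∀ b ∈ bboxes, b.length = 4
instance (bboxes : List (List Int)) : Decidable (Pre_fix_field_of_view bboxes) := by
  unfold Pre_fix_field_of_view; infer_instance

def pvWitness_fix_field_of_view : List (List Int) := [[10, 20, 30, 40], [0, 0, 5, 5]]

def Spec_fix_field_of_view (bboxes : List (List Int)) (out : List (List Int)) : Prop := out = fix_field_of_view_alt bboxes
instance (bboxes : List (List Int)) (out : List (List Int)) : Decidable (Spec_fix_field_of_view bboxes out) := by unfold Spec_fix_field_of_view; infer_instance

-- ===== CLAIM (what is proved, stated in full; the proofs are below) =====
def Claim_equal_fix_field_of_view : Prop := ∀ (bboxes : List (List Int)), Dom_fix_field_of_view bboxes → Pre_fix_field_of_view bboxes → Spec_fix_field_of_view bboxes (fix_field_of_view bboxes)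

-- ===== LEMMAS AND PROOFS =====

theorem bUnion_assoc (p q r : Int × Int × Int × Int) :
    bUnion (bUnion p q) r = bUnion p (bUnion q r) := by
  simp [bUnion, min_assoc, max_assoc]

theorem foldl_bUnion_assoc (l : List (Int × Int × Int × Int)) (p q : Int × Int × Int × Int) :
    l.foldl bUnion (bUnion p q) = bUnion p (l.foldl bUnion q) := by
  induction l generalizing q with
  | nil => rfl
  | cons a t ih => simp only [List.foldl_cons, bUnion_assoc, ih]

-- folding over a split list = union of the two folds
theorem foldl_bUnion_split (a b : Int × Int × Int × Int)
    (t1 t2 : List (Int × Int × Int × Int)) :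
    (t1 ++ b :: t2).foldl bUnion a = bUnion (t1.foldl bUnion a) (t2.foldl bUnion b) := by
  rw [List.foldl_append, List.foldl_cons, foldl_bUnion_assoc]

-- B's divide-and-conquer equals a left fold on any nonempty list
theorem dcU_cons : ∀ n (l : List (Int × Int × Int × Int)), l.length ≤ n →
    ∀ a t, l = a :: t → dcU l = some (t.foldl bUnion a) := by
  intro n
  induction n with
  | zero => intro l hl a t he; subst he; simp at hl
  | succ n ih =>
    intro l hl a t he
    subst he
    match t with
    | [] => simp [dcU]
    | b :: rest =>
      rw [dcU]
      set m := (a :: b :: rest).length / 2 with hm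
      have hlen : (a :: b :: rest).length = rest.length + 2 := by simp
      have hm1 : 1 ≤ m := by omega
      have hmlt : m < rest.length + 2 := by omega
      -- left half: a :: (take (m-1) (b::rest)); right half nonempty
      obtain ⟨t1, ht1⟩ : ∃ t1, (a :: b :: rest).take m = a :: t1 := by
        match hm2 : m with
        | 0 => omega
        | k + 1 => exact ⟨(b :: rest).take k, by simp⟩
      obtain ⟨c, t2, ht2⟩ : ∃ c t2, (a :: b :: rest).drop m = c :: t2 := by
        have : m < (a :: b :: rest).length := by omega
        cases hd : (a :: b :: rest).drop m with
        | nil => exfalso; have := List.length_drop (l := a :: b :: rest) (i := m); rw [hd] at this; simp at this; omega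
        | cons c t2 => exact ⟨c, t2, rfl⟩
      have hlt1 : ((a :: b :: rest).take m).length ≤ n := by
        simp; omega
      have hlt2 : ((a :: b :: rest).drop m).length ≤ n := by
        simp; omega
      rw [ht1] at hlt1 ⊢
      rw [ht2] at hlt2 ⊢
      rw [ih _ hlt1 a t1 rfl, ih _ hlt2 c t2 rfl]
      have hsplit : (a :: t1) ++ (c :: t2) = a :: b :: rest := by
        rw [← ht1, ← ht2]; simp
      have : b :: rest = t1 ++ c :: t2 := by
        have h2 := hsplit
        simp only [List.cons_append, List.cons.injEq] at h2
        exact h2.2.symm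
      rw [this, foldl_bUnion_split]

-- A's loop step is a box union for well-formed bboxes
theorem fovStep_eq_bUnion (fov : Int × Int × Int × Int) (b : List Int) (hb : b.length = 4) :
    fovStep fov b = bUnion fov (toCorner b) := by
  match b, hb with
  | [x, y, w, h], _ =>
    have e1 : (if x < fov.1 then x else fov.1) = min fov.1 x := by omega
    have e2 : (if y < fov.2.1 then y else fov.2.1) = min fov.2.1 y := by omega
    have e3 : (if x + w > fov.2.2.1 then x + w else fov.2.2.1) = max fov.2.2.1 (x + w) := by omega
    have e4 : (if y + h > fov.2.2.2 then y + h else fov.2.2.2) = max fov.2.2.2 (y + h) := by omega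
    simp [fovStep, toCorner, bUnion, e1, e2, e3, e4]

theorem foldl_fovStep_eq (bboxes : List (List Int)) (h : ∀ b ∈ bboxes, b.length = 4)
    (fov : Int × Int × Int × Int) :
    bboxes.foldl fovStep fov = (bboxes.map toCorner).foldl bUnion fov := by
  induction bboxes generalizing fov with
  | nil => rfl
  | cons b t ih =>
    simp only [List.foldl_cons, List.map_cons]
    rw [fovStep_eq_bUnion fov b (h b (List.mem_cons_self ..)),
        ih (fun x hx => h x (List.mem_cons_of_mem _ hx))]

-- ===== VERDICT (by name: the statement is the Claim_ definition above) =====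
theorem fix_field_of_view_spec : Claim_equal_fix_field_of_view := by
  intro bboxes _ hpre
  unfold Spec_fix_field_of_view fix_field_of_view fix_field_of_view_alt
  rw [foldl_fovStep_eq bboxes hpre]
  cases hb : bboxes.map toCorner with
  | nil =>
    have : bboxes = [] := by cases bboxes <;> simp_all
    subst this
    simp [dcU]
  | cons c cs =>
    have hd := dcU_cons (c :: cs).length _ le_rfl c cs rfl
    simp only [hd, List.foldl_cons, foldl_bUnion_assoc, List.map_const', List.length_range]
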